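-- pv_equiv track=rewrite | github.com/cristianaguayo/evaluacion-fixture-SLA | scripts/mvbenchmarkfixture.py | FormulaBase
-- ===== SOURCE A (Python) =====
-- def FormulaBase(df_reg_columns):
--     formula = "goles ~ %s + %s + %s"
--     atts_str = " + ".join([i for i in df_reg_columns if 'atts_' in i])
--     defs_str = " + ".join([i for i in df_reg_columns if 'defs_' in i])
--     homes_str = " + ".join([i for i in df_reg_columns if 'homes_' in i])
--     formula = formula % (atts_str, defs_str, homes_str)
--     constraints = [atts_str, defs_str, homes_str]
--     return formula, constraints
-- ===== SOURCE B (Python) =====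
-- def FormulaBase(df_reg_columns):
--     # Build the three joined strings directly in one pass: an accumulator of None
--     # means "no column seen yet"; otherwise the separator is spliced in inline,
--     # so no intermediate lists and no join() are needed.
--     def add(acc, name):
--         return name if acc is None else acc + " + " + name
--     atts = defs = homes = None
--     for name in df_reg_columns:
--         if 'atts_' in name:
--             atts = add(atts, name)
--         if 'defs_' in name:
--             defs = add(defs, name)
--         if 'homes_' in name:
--             homes = add(homes, name)
--     constraints = [atts if atts is not None else "",
--                    defs if defs is not None else "",
--                    homes if homes is not None else ""]
--     return "goles ~ %s + %s + %s" % tuple(constraints), constraints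
-- ===== Notes on version B (the rewrite author's own statement) =====
-- stated objective: alternative
-- what changed: B builds the three joined strings directly in a single pass with optional string accumulators that splice the ' + ' separator inline, eliminating both the three filtering scans and the join() calls of A.
import Mathlib
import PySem

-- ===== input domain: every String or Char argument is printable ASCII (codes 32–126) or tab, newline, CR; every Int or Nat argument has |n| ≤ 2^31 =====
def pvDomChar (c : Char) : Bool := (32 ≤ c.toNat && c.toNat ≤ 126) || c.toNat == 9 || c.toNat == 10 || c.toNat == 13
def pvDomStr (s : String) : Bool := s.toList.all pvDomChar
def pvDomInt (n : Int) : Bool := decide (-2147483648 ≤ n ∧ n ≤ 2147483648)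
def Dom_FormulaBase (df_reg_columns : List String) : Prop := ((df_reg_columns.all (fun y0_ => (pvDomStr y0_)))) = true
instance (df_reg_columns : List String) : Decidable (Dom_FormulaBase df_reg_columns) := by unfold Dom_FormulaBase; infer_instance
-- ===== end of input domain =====

-- B builds the three joined strings directly in one pass with optional accumulators that splice the separator inline (no filtering scans, no join).

-- ===== PORT A =====
def FormulaBase (df_reg_columns : List String) : String × List String :=
  let atts_str := PySem.Str.join " + " (df_reg_columns.filter (fun i => PySem.Str.isIn "atts_" i))
  let defs_str := PySem.Str.join " + " (df_reg_columns.filter (fun i => PySem.Str.isIn "defs_" i))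
  let homes_str := PySem.Str.join " + " (df_reg_columns.filter (fun i => PySem.Str.isIn "homes_" i))
  let formula := "goles ~ " ++ atts_str ++ " + " ++ defs_str ++ " + " ++ homes_str
  (formula, [atts_str, defs_str, homes_str])

-- ===== PORT B =====
-- Source B's 'add': splice the separator in unless the accumulator is still empty (None).
def pvAdd (acc : Option String) (name : String) : String :=
  match acc with
  | none => name
  | some s => s ++ " + " ++ name

def FormulaBase_alt (df_reg_columns : List String) : String × List String :=
  let acc := df_reg_columns.foldl
    (fun (acc : Option String × Option String × Option String) name =>
      let a := if PySem.Str.isIn "atts_" name then some (pvAdd acc.1 name) else acc.1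
      let d := if PySem.Str.isIn "defs_" name then some (pvAdd acc.2.1 name) else acc.2.1
      let h := if PySem.Str.isIn "homes_" name then some (pvAdd acc.2.2 name) else acc.2.2
      (a, d, h))
    (none, none, none)
  let atts_str := acc.1.getD ""
  let defs_str := acc.2.1.getD ""
  let homes_str := acc.2.2.getD ""
  ("goles ~ " ++ atts_str ++ " + " ++ defs_str ++ " + " ++ homes_str,
   [atts_str, defs_str, homes_str])

-- ===== PRECONDITION & SPEC =====
def Spec_FormulaBase (df_reg_columns : List String) (out : String × List String) : Prop := out = FormulaBase_alt df_reg_columns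
instance (df_reg_columns : List String) (out : String × List String) : Decidable (Spec_FormulaBase df_reg_columns out) := by unfold Spec_FormulaBase; infer_instance

-- ===== CLAIM =====
def Claim_equal_FormulaBase : Prop := ∀ (df_reg_columns : List String), Dom_FormulaBase df_reg_columns → Spec_FormulaBase df_reg_columns (FormulaBase df_reg_columns)

-- ===== LEMMAS AND PROOFS =====

-- One step of the B fold on a single component.
def pvStep (p : String → Bool) (o : Option String) (name : String) : Option String :=
  if p name then some (pvAdd o name) else o

-- Joining with a nonempty head absorbed: Str.join " + " (s :: x :: xs) regroups.
theorem str_join_absorb (s x : String) (xs : List String) :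
    PySem.Str.join " + " (s :: x :: xs) = PySem.Str.join " + " ((s ++ " + " ++ x) :: xs) := by
  cases xs with
  | nil =>
    simp [PySem.Str.join, PySem.Chars.join_cons_cons, PySem.Chars.join_singleton,
      String.ofList]
  | cons y ys =>
    simp [PySem.Str.join, PySem.Chars.join_cons_cons, String.ofList, List.append_assoc]

-- The per-component fold starting from a seen value s computes the join of s :: rest.
theorem pvStep_foldl_some (p : String → Bool) (l : List String) (s : String) :
    (l.foldl (pvStep p) (some s)).getD ""
      = PySem.Str.join " + " (s :: l.filter p) := by
  induction l generalizing s with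
  | nil => simp [PySem.Chars.join_singleton, PySem.Str.join, String.ofList]
  | cons x xs ih =>
    simp only [List.foldl_cons, List.filter_cons, pvStep]
    by_cases h : p x
    · simp only [h, if_pos, ih, pvAdd, str_join_absorb]
    · simp [h, ih]

-- The per-component fold from none computes the join of the filtered list.
theorem pvStep_foldl_none (p : String → Bool) (l : List String) :
    (l.foldl (pvStep p) none).getD "" = PySem.Str.join " + " (l.filter p) := by
  induction l with
  | nil => simp [PySem.Str.join, PySem.Chars.join_nil]
  | cons x xs ih =>
    simp only [List.foldl_cons, List.filter_cons, pvStep]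
    by_cases h : p x
    · simp only [h, if_pos, pvAdd, pvStep_foldl_some]
    · simp [h, ih]

-- The triple fold of B is the three independent per-component folds.
theorem triple_fold_eq (cols : List String)
    (a d h : Option String) :
    cols.foldl
      (fun (acc : Option String × Option String × Option String) name =>
        let a := if PySem.Str.isIn "atts_" name then some (pvAdd acc.1 name) else acc.1
        let d := if PySem.Str.isIn "defs_" name then some (pvAdd acc.2.1 name) else acc.2.1
        let h := if PySem.Str.isIn "homes_" name then some (pvAdd acc.2.2 name) else acc.2.2
        (a, d, h))
      (a, d, h)
    = (cols.foldl (pvStep (fun i => PySem.Str.isIn "atts_" i)) a,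
       cols.foldl (pvStep (fun i => PySem.Str.isIn "defs_" i)) d,
       cols.foldl (pvStep (fun i => PySem.Str.isIn "homes_" i)) h) := by
  induction cols generalizing a d h with
  | nil => rfl
  | cons x xs ih => simp only [List.foldl_cons, ih, pvStep]

-- ===== VERDICT =====
theorem FormulaBase_spec : Claim_equal_FormulaBase := by
  intro cols _
  unfold Spec_FormulaBase FormulaBase FormulaBase_alt
  rw [triple_fold_eq]
  simp only [pvStep_foldl_none]
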